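-- pv_equiv track=rewrite | github.com/PaulHax/align-system | align_system/algorithms/lib/util.py | dialog_from_string
-- ===== SOURCE A (Python) =====
-- from typing import List, Dict
--
-- def dialog_from_string(dialog_string: str) -> List[Dict[str, str]]:
--     """
--     Transforms the dialog in string format to a list of dictionary format.
--
--     :param dialog_string: Dialog in string format.
--     :return: Dialog in the list of dictionary format.
--     """
--     # Dictionary to map string markers to role names
--     dialog_markers = {
--         '=== system': 'system',
--         '=== user': 'user',
--         '=== assistant': 'assistant',
--     }
--     dialog = []
--     lines = dialog_string.split('\n')
--
--     current_role = ''
--     current_content = ''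
--     for line in lines:
--         if line.strip() in dialog_markers:  # If a line indicates a role change
--             if current_role and current_content:  # Save the previous role's dialog
--                 dialog.append({
--                     'role': current_role,
--                     'content': current_content.strip()
--                 })
--             current_role = dialog_markers[line.strip()]  # Set the new role
--             current_content = ''
--         else:  # Continue appending content if the role hasn't changed
--             current_content += f'{line}\n'
--     # Append the last piece of dialog
--     if current_role and current_content:
--         dialog.append({
--             'role': current_role,
--             'content': current_content.strip()
--         })
--     return dialog
-- ===== SOURCE B (Python) =====
-- def dialog_from_string(dialog_string):
--     markers = {
--         '=== system': 'system',
--         '=== user': 'user',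
--         '=== assistant': 'assistant',
--     }
--     lines = dialog_string.split('\n')
--     n = len(lines)
--     out = []
--     # skip everything before the first marker line (A discards that preamble)
--     i = 0
--     while i < n and lines[i].strip() not in markers:
--         i += 1
--     # segment scan: each marker opens a section running to the next marker;
--     # emit a dict per section that contains at least one line
--     while i < n:
--         role = markers[lines[i].strip()]
--         j = i + 1
--         while j < n and lines[j].strip() not in markers:
--             j += 1
--         if j > i + 1:
--             out.append({'role': role, 'content': '\n'.join(lines[i + 1:j]).strip()})
--         i = j
--     return out
-- ===== Notes on version B (the rewrite author's own statement) =====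
-- stated objective: alternative
-- what changed: A streams over the lines accumulating a content string and flushing a dict at each role change; B never accumulates: it scans for marker positions with an index two-pointer loop and, for each pair of consecutive markers, slices the lines between them and joins/strips that slice into one dict.
import Mathlib
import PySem

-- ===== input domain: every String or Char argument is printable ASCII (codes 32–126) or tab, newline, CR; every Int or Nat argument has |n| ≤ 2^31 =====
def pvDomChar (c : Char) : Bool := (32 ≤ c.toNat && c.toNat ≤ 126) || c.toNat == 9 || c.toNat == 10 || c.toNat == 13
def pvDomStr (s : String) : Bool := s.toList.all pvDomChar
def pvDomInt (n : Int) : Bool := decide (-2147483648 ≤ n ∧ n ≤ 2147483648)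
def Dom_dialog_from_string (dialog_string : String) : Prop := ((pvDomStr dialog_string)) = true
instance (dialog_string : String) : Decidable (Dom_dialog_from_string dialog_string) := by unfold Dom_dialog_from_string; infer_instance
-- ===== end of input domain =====

-- B replaces A's streaming accumulate-and-flush loop by an index-based segment scan (find the
-- next marker position, slice the lines between consecutive markers, join per segment); objective: alternative.

-- ===== PORT A =====
def dialogMarkersA : PySem.Dict String String :=
  ((PySem.Dict.empty.insert "=== system" "system").insert "=== user" "user").insert "=== assistant" "assistant"

-- one iteration of A's for-loop; state = (dialog, current_role, current_content)
def dfsStepA (st : List (List (String × String)) × String × String) (line : String) :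
    List (List (String × String)) × String × String :=
  if dialogMarkersA.contains (PySem.Str.strip line) then
    ((if st.2.1 ≠ "" ∧ st.2.2 ≠ "" then
        st.1 ++ [[("role", st.2.1), ("content", PySem.Str.strip st.2.2)]]
      else st.1),
     dialogMarkersA.getD (PySem.Str.strip line) "", "")
  else
    (st.1, st.2.1, st.2.2 ++ line ++ "\n")

def dialog_from_string (dialog_string : String) : List (List (String × String)) :=
  -- sep "\n" ≠ "": Python's split never raises; split? is always some here
  let lines := (PySem.Str.split? dialog_string "\n").getD []
  let st := lines.foldl dfsStepA ([], "", "")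
  if st.2.1 ≠ "" ∧ st.2.2 ≠ "" then
    st.1 ++ [[("role", st.2.1), ("content", PySem.Str.strip st.2.2)]]
  else st.1

-- ===== PORT B =====
def dialogMarkersB : PySem.Dict String String :=
  ((PySem.Dict.empty.insert "=== system" "system").insert "=== user" "user").insert "=== assistant" "assistant"

-- B's `while k < n and lines[k].strip() not in markers: k += 1` scan (the preamble skip and
-- the inner next-marker scan are this same loop in Source B)
def bFindMark (lines : List String) (i : Nat) : Nat :=
  if h : i < lines.length then
    if dialogMarkersB.contains (PySem.Str.strip lines[i]) then i else bFindMark lines (i + 1)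
  else i
termination_by lines.length - i

-- needed for bLoop's termination
lemma le_bFindMark (lines : List String) (i : Nat) : i ≤ bFindMark lines i := by
  fun_induction bFindMark lines i with
  | case1 => omega
  | case2 _ _ _ ih => omega
  | case3 => omega

-- B's outer `while i < n` loop: read the role at i, scan to the next marker j, emit the
-- segment lines[i+1:j] when it is non-empty, continue at j
def bLoop (lines : List String) (i : Nat) : List (List (String × String)) :=
  if h : i < lines.length then
    (if i + 1 < bFindMark lines (i + 1) then
       [[("role", dialogMarkersB.getD (PySem.Str.strip lines[i]) ""),
         ("content", PySem.Str.strip (PySem.Str.join "\n"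
            (PySem.List.slice lines (some ((i : Int) + 1)) (some ((bFindMark lines (i + 1) : Nat) : Int)))))]]
     else [])
      ++ bLoop lines (bFindMark lines (i + 1))
  else []
termination_by lines.length - i
decreasing_by
  have := le_bFindMark lines (i + 1); omega

def dialog_from_string_alt (dialog_string : String) : List (List (String × String)) :=
  let lines := (PySem.Str.split? dialog_string "\n").getD []
  bLoop lines (bFindMark lines 0)

-- ===== PRECONDITION & SPEC =====
def Spec_dialog_from_string (dialog_string : String) (out : List (List (String × String))) : Prop := out = dialog_from_string_alt dialog_string
instance (dialog_string : String) (out : List (List (String × String))) : Decidable (Spec_dialog_from_string dialog_string out) := by unfold Spec_dialog_from_string; infer_instance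

-- ===== CLAIM (what is proved, stated in full; the proofs are below) =====
def Claim_equal_dialog_from_string : Prop := ∀ (dialog_string : String), Dom_dialog_from_string dialog_string → Spec_dialog_from_string dialog_string (dialog_from_string dialog_string)

-- ===== LEMMAS AND PROOFS =====

-- proof-side notions: marker test, grouping of lines into (role, section-lines) pairs,
-- and the emit pass; both programs are shown to produce dfsEmit (dfsG lines)
def dfsIsM (l : String) : Bool := dialogMarkersB.contains (PySem.Str.strip l)

def dfsG (lines : List String) : List (String × List String) :=
  match lines with
  | [] => []
  | l :: t =>
    if dfsIsM l then
      (dialogMarkersB.getD (PySem.Str.strip l) "", t.takeWhile (fun x => !dfsIsM x)) ::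
        dfsG (t.dropWhile (fun x => !dfsIsM x))
    else dfsG t
termination_by lines.length
decreasing_by
  · have := List.length_dropWhile_le (fun x => !dfsIsM x) t; simp; omega
  · simp

def dfsEmit (groups : List (String × List String)) : List (List (String × String)) :=
  (groups.filter (fun g => !g.2.isEmpty)).map
    (fun g => [("role", g.1), ("content", PySem.Str.strip (PySem.Str.join "\n" g.2))])

-- A's current_content after accumulating the lines `acc`
def dfsContent (acc : List String) : String := acc.foldl (fun c l => c ++ l ++ "\n") ""

-- A's flush (the body of both `if current_role and current_content` blocks)
def dfsFinA (st : List (List (String × String)) × String × String) : List (List (String × String)) :=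
  if st.2.1 ≠ "" ∧ st.2.2 ≠ "" then
    st.1 ++ [[("role", st.2.1), ("content", PySem.Str.strip st.2.2)]]
  else st.1

lemma dfsContent_toList (acc : List String) (c0 : String) :
    (acc.foldl (fun c l => c ++ l ++ "\n") c0).toList
      = c0.toList ++ (acc.map (fun l => l.toList ++ ['\n'])).flatten := by
  induction acc generalizing c0 with
  | nil => simp
  | cons a t ih => simp [List.foldl, ih, String.toList_append]

lemma dfsContent_eq_empty_iff (acc : List String) : dfsContent acc = "" ↔ acc = [] := by
  constructor
  · intro h
    have := congrArg String.toList h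
    rw [dfsContent, dfsContent_toList] at this
    cases acc with
    | nil => rfl
    | cons a t => simp at this
  · intro h; simp [h, dfsContent]

lemma dfs_flatten_eq_join (ls : List (List Char)) (h : ls ≠ []) :
    (ls.map (fun l => l ++ ['\n'])).flatten = PySem.Chars.join ['\n'] ls ++ ['\n'] := by
  induction ls with
  | nil => exact absurd rfl h
  | cons a t ih =>
    cases t with
    | nil => simp [PySem.Chars.join, List.intercalate]
    | cons b u =>
      rw [PySem.Chars.join_cons_cons]
      simp only [List.map_cons, List.flatten_cons] at ih ⊢
      rw [ih (by simp)]
      simp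

lemma dfs_rstrip_append_nl (x : List Char) :
    PySem.Chars.rstrip (x ++ ['\n']) = PySem.Chars.rstrip x := by
  simp [PySem.Chars.rstrip, PySem.Chars.isspace]

lemma dfs_strip_append_nl (x : List Char) :
    PySem.Chars.strip (x ++ ['\n']) = PySem.Chars.strip x := by
  unfold PySem.Chars.strip PySem.Chars.lstrip
  rw [List.dropWhile_append]
  by_cases h : (List.dropWhile PySem.Chars.isspace x).isEmpty
  · simp [List.isEmpty_iff.mp h, List.dropWhile, PySem.Chars.isspace, PySem.Chars.rstrip]
  · simp only [h, if_neg, Bool.false_eq_true, not_false_iff]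
    exact dfs_rstrip_append_nl _

lemma dfs_strip_content (acc : List String) (h : acc ≠ []) :
    PySem.Str.strip (dfsContent acc) = PySem.Str.strip (PySem.Str.join "\n" acc) := by
  have hl : (PySem.Str.strip (dfsContent acc)).toList
      = (PySem.Str.strip (PySem.Str.join "\n" acc)).toList := by
    rw [PySem.Str.toList_strip, PySem.Str.toList_strip, PySem.Str.toList_join]
    rw [dfsContent, dfsContent_toList]
    have hmap : acc.map (fun l => l.toList ++ ['\n'])
        = (acc.map String.toList).map (fun l => l ++ ['\n']) := by simp
    rw [hmap, dfs_flatten_eq_join _ (by simpa using h)]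
    have hsep : ("\n" : String).toList = ['\n'] := rfl
    rw [hsep]
    simpa using dfs_strip_append_nl (PySem.Chars.join ['\n'] (acc.map String.toList))
  exact String.toList_inj.mp hl

-- values stored in the markers dict are never the empty string
lemma dfs_getD_ne_empty (k : String) (h : dialogMarkersB.contains k = true) :
    dialogMarkersB.getD k "" ≠ "" := by
  have hi : dialogMarkersB.items
      = [("=== system", "system"), ("=== user", "user"), ("=== assistant", "assistant")] := rfl
  rw [PySem.Dict.contains, hi] at h
  simp only [List.any_cons, List.any_nil, Bool.or_eq_true, beq_iff_eq] at h
  rcases h with h | h | h | h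
  all_goals first
    | (subst h; decide)
    | simp at h

lemma dfs_markersA_eq : dialogMarkersA = dialogMarkersB := rfl

lemma dfsEmit_cons (g : String × List String) (gs : List (String × List String)) :
    dfsEmit (g :: gs)
      = (if g.2.isEmpty then ([] : List (List (String × String)))
         else [[("role", g.1), ("content", PySem.Str.strip (PySem.Str.join "\n" g.2))]])
        ++ dfsEmit gs := by
  by_cases h : g.2.isEmpty <;> simp [dfsEmit, h]

-- flushing a state whose content accumulated exactly the lines `ls` emits the group (r, ls)
lemma dfsFinA_eq_emit (d : List (List (String × String))) (r : String) (ls : List String)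
    (hr : r ≠ "") : dfsFinA (d, r, dfsContent ls) = d ++ dfsEmit [(r, ls)] := by
  by_cases hls : ls = []
  · subst hls
    simp [dfsFinA, dfsEmit, hr, dfsContent]
  · have hc : dfsContent ls ≠ "" := fun h => hls ((dfsContent_eq_empty_iff ls).mp h)
    simp only [dfsFinA, dfsEmit, List.filter_cons]
    simp [hr, hc, hls, dfs_strip_content ls hls]

-- the first line surviving the non-marker dropWhile is a marker
lemma dfs_dropWhile_head (lines : List String) (m : String) (t : List String)
    (h : lines.dropWhile (fun x => !dfsIsM x) = m :: t) : dfsIsM m = true := by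
  induction lines with
  | nil => simp at h
  | cons a l ih =>
    rw [List.dropWhile_cons] at h
    by_cases ha : dfsIsM a = true
    · simp only [ha, Bool.not_true, Bool.false_eq_true, if_false] at h
      cases h; exact ha
    · simp only [Bool.not_eq_true] at ha
      simp only [ha, Bool.not_false, if_pos] at h
      exact ih h

-- dfsG ignores leading non-marker lines
lemma dfsG_dropWhile (lines : List String) :
    dfsG (lines.dropWhile (fun x => !dfsIsM x)) = dfsG lines := by
  induction lines with
  | nil => simp
  | cons a t ih =>
    rw [List.dropWhile_cons]
    by_cases ha : dfsIsM a = true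
    · simp [ha]
    · simp only [Bool.not_eq_true] at ha
      simp only [ha, Bool.not_false, if_pos]
      rw [ih, dfsG]
      simp [ha]

-- A's fold over a run of non-marker lines only extends current_content
lemma dfsA_run_nonmark (body : List String) (hb : ∀ l ∈ body, dfsIsM l = false)
    (d : List (List (String × String))) (r c : String) :
    body.foldl dfsStepA (d, r, c) = (d, r, body.foldl (fun c l => c ++ l ++ "\n") c) := by
  induction body generalizing c with
  | nil => simp
  | cons a t ih =>
    have ha : dfsIsM a = false := hb a (by simp)
    have ht : ∀ l ∈ t, dfsIsM l = false := fun l hl => hb l (by simp [hl])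
    rw [dfsIsM] at ha
    simp only [List.foldl_cons, dfsStepA, dfs_markersA_eq, ha]
    simp [ih ht]

-- A's step at a marker line flushes and opens the new role
lemma dfsStepA_marker (st : List (List (String × String)) × String × String) (line : String)
    (hm : dialogMarkersA.contains (PySem.Str.strip line) = true) :
    dfsStepA st line = (dfsFinA st, dialogMarkersB.getD (PySem.Str.strip line) "", "") := by
  have hm2 : dialogMarkersB.contains (PySem.Str.strip line) = true := hm
  simp only [dfsStepA, dfs_markersA_eq, hm2, if_pos, dfsFinA]

-- main A-side invariant: from an open group (role r, accumulated lines acc), running A's loop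
-- over the remaining lines and flushing yields the emitted groups
lemma dfsA_open (n : Nat) (lines : List String) (hn : lines.length ≤ n)
    (d : List (List (String × String))) (r : String) (acc : List String) (hr : r ≠ "") :
    dfsFinA (lines.foldl dfsStepA (d, r, dfsContent acc))
      = d ++ dfsEmit ((r, acc ++ lines.takeWhile (fun x => !dfsIsM x))
          :: dfsG (lines.dropWhile (fun x => !dfsIsM x))) := by
  induction n generalizing lines d r acc with
  | zero =>
    have : lines = [] := List.length_eq_zero_iff.mp (by omega)
    subst this
    rw [List.takeWhile_nil, List.dropWhile_nil, List.foldl_nil, List.append_nil,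
      dfsFinA_eq_emit d r acc hr]
    simp [dfsG]
  | succ n ih =>
    have hsplit := List.takeWhile_append_dropWhile (p := fun x => !dfsIsM x) (l := lines)
    have hb : ∀ l ∈ lines.takeWhile (fun x => !dfsIsM x), dfsIsM l = false := by
      intro l hl
      have := List.mem_takeWhile_imp hl
      simpa using this
    have hfold : lines.foldl dfsStepA (d, r, dfsContent acc)
        = (lines.dropWhile (fun x => !dfsIsM x)).foldl dfsStepA
            (d, r, dfsContent (acc ++ lines.takeWhile (fun x => !dfsIsM x))) := by
      conv_lhs => rw [← hsplit]
      rw [List.foldl_append, dfsA_run_nonmark _ hb]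
      simp only [dfsContent, List.foldl_append]
    cases hrc : lines.dropWhile (fun x => !dfsIsM x) with
    | nil =>
      rw [hfold, hrc, List.foldl_nil,
        dfsFinA_eq_emit d r (acc ++ lines.takeWhile (fun x => !dfsIsM x)) hr]
      simp [dfsG]
    | cons m t =>
      have hm : dfsIsM m = true := dfs_dropWhile_head lines m t hrc
      have hlen : t.length ≤ n := by
        have h1 := List.length_dropWhile_le (fun x => !dfsIsM x) lines
        rw [hrc] at h1; simp at h1; omega
      rw [hfold, hrc, List.foldl_cons]
      have hm' : dialogMarkersA.contains (PySem.Str.strip m) = true := hm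
      rw [dfsStepA_marker _ _ hm',
        dfsFinA_eq_emit d r (acc ++ lines.takeWhile (fun x => !dfsIsM x)) hr]
      have hnewr := dfs_getD_ne_empty (PySem.Str.strip m) hm
      have hrec := ih t hlen (d ++ dfsEmit [(r, acc ++ lines.takeWhile (fun x => !dfsIsM x))])
        (dialogMarkersB.getD (PySem.Str.strip m) "") [] hnewr
      rw [show dfsContent [] = "" from rfl] at hrec
      rw [hrec, dfsG]
      simp only [hm, if_pos, List.nil_append, dfsEmit_cons]
      simp [dfsEmit, List.append_assoc]

-- A's full loop from the initial state (role '') produces the emitted groups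
lemma dfsA_total (lines : List String) :
    dfsFinA (lines.foldl dfsStepA ([], "", "")) = dfsEmit (dfsG lines) := by
  have hsplit := List.takeWhile_append_dropWhile (p := fun x => !dfsIsM x) (l := lines)
  have hb : ∀ l ∈ lines.takeWhile (fun x => !dfsIsM x), dfsIsM l = false := by
    intro l hl
    have := List.mem_takeWhile_imp hl
    simpa using this
  have hfold : lines.foldl dfsStepA ([], "", "")
      = (lines.dropWhile (fun x => !dfsIsM x)).foldl dfsStepA
          (([] : List (List (String × String))), "",
           (lines.takeWhile (fun x => !dfsIsM x)).foldl (fun c l => c ++ l ++ "\n") "") := by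
    conv_lhs => rw [← hsplit]
    rw [List.foldl_append, dfsA_run_nonmark _ hb]
  rw [← dfsG_dropWhile lines]
  cases hrc : lines.dropWhile (fun x => !dfsIsM x) with
  | nil =>
    rw [hfold, hrc, List.foldl_nil]
    simp [dfsFinA, dfsG, dfsEmit]
  | cons m t =>
    have hm : dfsIsM m = true := dfs_dropWhile_head lines m t hrc
    rw [hfold, hrc, List.foldl_cons]
    have hm' : dialogMarkersA.contains (PySem.Str.strip m) = true := hm
    rw [dfsStepA_marker _ _ hm',
      show dfsFinA (([] : List (List (String × String))), "",
        (lines.takeWhile (fun x => !dfsIsM x)).foldl (fun c l => c ++ l ++ "\n") "") = []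
      from by simp [dfsFinA]]
    have hnewr := dfs_getD_ne_empty (PySem.Str.strip m) hm
    have hrec := dfsA_open t.length t le_rfl []
      (dialogMarkersB.getD (PySem.Str.strip m) "") [] hnewr
    rw [show dfsContent [] = "" from rfl] at hrec
    rw [hrec]
    rw [dfsG]
    simp [hm]

-- B-side: the scan stops right after the maximal non-marker run
lemma bFindMark_eq (lines : List String) (i : Nat) :
    bFindMark lines i = i + ((lines.drop i).takeWhile (fun x => !dfsIsM x)).length := by
  fun_induction bFindMark lines i with
  | case1 i h hm =>
    have hm' : dfsIsM lines[i] = true := hm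
    rw [List.drop_eq_getElem_cons h, List.takeWhile_cons]
    simp [hm']
  | case2 i h hm ih =>
    have hm' : dfsIsM lines[i] = false := by simpa [dfsIsM] using hm
    rw [List.drop_eq_getElem_cons h, List.takeWhile_cons]
    simp only [hm', Bool.not_false, if_pos, List.length_cons]
    omega
  | case3 i h =>
    rw [List.drop_eq_nil_of_le (by omega)]
    simp

lemma bFindMark_mark (lines : List String) (i : Nat)
    (h : bFindMark lines i < lines.length) :
    dfsIsM (lines[bFindMark lines i]'h) = true := by
  fun_induction bFindMark lines i with
  | case1 i hi hm => exact hm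
  | case2 i hi hm ih => exact ih h
  | case3 i hi => omega

lemma drop_bFindMark (lines : List String) (i : Nat) :
    lines.drop (bFindMark lines i) = (lines.drop i).dropWhile (fun x => !dfsIsM x) := by
  rw [bFindMark_eq, ← List.drop_drop]
  set tw := (lines.drop i).takeWhile (fun x => !dfsIsM x) with htw
  set dw := (lines.drop i).dropWhile (fun x => !dfsIsM x) with hdw
  have h : tw ++ dw = lines.drop i := List.takeWhile_append_dropWhile ..
  rw [← h]
  exact List.drop_left ..

-- B's outer loop, started at a marker position (or past the end), emits the groups of the
-- remaining lines
lemma bLoop_eq (lines : List String) (i : Nat)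
    (hm : ∀ h : i < lines.length, dfsIsM (lines[i]'h) = true) :
    bLoop lines i = dfsEmit (dfsG (lines.drop i)) := by
  fun_induction bLoop lines i with
  | case1 i h ih =>
    have hmi : dfsIsM (lines[i]'h) = true := hm h
    rw [List.drop_eq_getElem_cons h, dfsG]
    simp only [hmi, if_pos]
    rw [dfsEmit_cons]
    have hfm := bFindMark_eq lines (i + 1)
    set tw := (lines.drop (i + 1)).takeWhile (fun x => !dfsIsM x) with htw
    set dw := (lines.drop (i + 1)).dropWhile (fun x => !dfsIsM x) with hdw
    have hsp : tw ++ dw = lines.drop (i + 1) := List.takeWhile_append_dropWhile ..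
    have hslice : PySem.List.slice lines (some ((i : Int) + 1))
        (some ((bFindMark lines (i + 1) : Nat) : Int)) = tw := by
      have hcast : ((i : Int) + 1) = (((i + 1 : Nat)) : Int) := by push_cast; ring
      rw [hcast, PySem.List.slice_natCast, hfm]
      have hl : i + 1 + tw.length - (i + 1) = tw.length := by omega
      rw [hl, ← hsp]
      exact List.take_left ..
    have hcond : (i + 1 < bFindMark lines (i + 1)) ↔ ¬ tw.isEmpty := by
      rw [hfm]
      cases tw <;> simp
    rw [ih (fun h' => bFindMark_mark lines (i + 1) h')]
    rw [drop_bFindMark]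
    by_cases hc : i + 1 < bFindMark lines (i + 1)
    · have hne : (tw.isEmpty = true) = False := by simp [hcond.mp hc]
      simp only [hc, if_pos, hne, if_false]
      rw [hslice]
    · have hemp : tw.isEmpty = true := by
        by_contra hne; exact hc (hcond.mpr (by simpa using hne))
      simp only [hc, hemp, if_pos, List.nil_append]
      rfl
  | case2 i h =>
    rw [List.drop_eq_nil_of_le (by omega)]
    simp [dfsG, dfsEmit]

-- ===== VERDICT (by name: the statement is the Claim_ definition above) =====
theorem dialog_from_string_spec : Claim_equal_dialog_from_string := by
  intro s _
  show _ = _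
  rw [dialog_from_string, dialog_from_string_alt]
  have hA : ∀ lines : List String,
      (let st := lines.foldl dfsStepA ([], "", "")
       if st.2.1 ≠ "" ∧ st.2.2 ≠ "" then
         st.1 ++ [[("role", st.2.1), ("content", PySem.Str.strip st.2.2)]]
       else st.1) = dfsFinA (lines.foldl dfsStepA ([], "", "")) := fun _ => rfl
  rw [hA, dfsA_total]
  rw [bLoop_eq _ _ (fun h => bFindMark_mark _ 0 h)]
  rw [drop_bFindMark]
  rw [List.drop_zero]
  rw [dfsG_dropWhile]
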